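-- pv_equiv track=rewrite | github.com/hellowhaaa/StanCode_Project | stanCode_Project/Hangman_game/similarity.py | find
-- ===== SOURCE A (Python) =====
-- def find(long, short):
--
--     """
--     用途:找出相似字串
--     流程:欲尋找的短基因序列的index是固定的,而長基因序列的index會隨著迴圈增加,
--     其序列長度由短基因的長度決定,直到兩者配對到最後一個字母,藉由紀錄最高值找出相似度最高的序列
--     Purpose: Find the most similar string.
--     Process: The index of short DNA string is fixed. However,The index of short DNA string
--              increases while in loop. The length of each string are determined by short string.
--              The function won't end until the last alphabet is executed.
--     """
--     letters = ""  # 欲尋找的相似基因片段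
--     times = 0  # 相同字母的次數
--     highest = 0
--     for k in range(0, len(long)-len(short)+1):  # 長基因序列index往右移
--         times = 0
--         ch1 = long[k:k + len(short)]  # 長基因的字串
--         ch = short[0:len(short)]  # 短基因的字串
--         for j in range(0, len(short)):
--             s1 = ch1[j]
--             s2 = ch[j]
--             if s1 == s2:
--                 times += 1
--             if times > highest:
--                 highest = times  # highest越高表字串相似度越高
--                 letters = long[k:k + len(short)]  # 相似度最高的字串
--     return letters
-- ===== SOURCE B (Python) =====
-- def bl(lst, x):
--     """first index in sorted lst whose value is >= x (bisect_left, hand-rolled)"""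
--     lo, hi = 0, len(lst)
--     while lo < hi:
--         mid = (lo + hi) // 2
--         if lst[mid] < x:
--             lo = mid + 1
--         else:
--             hi = mid
--     return lo
--
--
-- def find(long, short):
--     n, m = len(long), len(short)
--     w = n - m
--     pos = {}
--     for j, c in enumerate(short):
--         pos.setdefault(c, []).append(j)
--     counts = [0] * (w + 1)
--     for i, c in enumerate(long):
--         lst = pos.get(c, [])
--         for j in lst[bl(lst, i - w):bl(lst, i + 1)]:
--             counts[i - j] += 1
--     best, hi = -1, 0
--     for k, c in enumerate(counts):
--         if c > hi:
--             best, hi = k, c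
--     return long[best:best + m] if best >= 0 else ""
-- ===== Notes on version B (the rewrite author's own statement) =====
-- stated objective: alternative
-- what changed: Replaces A's window-by-window rescan with offset-bucket counting: an index of the short string's character positions is built once, one pass over the long string adds, for each position, 1 to the match counter of every offset whose bucket entry lies in the valid window (located by a hand-rolled bisect), and a final scan picks the first window with a new maximum.
import Mathlib
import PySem

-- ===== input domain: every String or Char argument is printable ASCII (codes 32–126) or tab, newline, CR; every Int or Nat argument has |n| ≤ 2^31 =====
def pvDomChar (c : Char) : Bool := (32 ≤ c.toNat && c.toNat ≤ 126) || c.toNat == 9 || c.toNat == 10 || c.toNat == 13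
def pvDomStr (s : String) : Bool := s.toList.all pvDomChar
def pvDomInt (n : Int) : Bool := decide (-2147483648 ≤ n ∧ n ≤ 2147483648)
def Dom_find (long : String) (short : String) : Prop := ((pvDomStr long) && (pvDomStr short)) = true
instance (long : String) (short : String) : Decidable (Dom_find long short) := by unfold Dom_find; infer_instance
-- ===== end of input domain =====

-- B replaces A's window-by-window rescan with offset-bucket counting (index the short
-- string's character positions once, then one pass over the long string adds 1 to the
-- match counter of each offset whose bucket entry lies in the valid window, located by a
-- hand-rolled bisect, and a final scan takes the first strict maximum); objective:
-- alternative (a genuinely different algorithm of comparable measured cost).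

-- ===== PORT A =====
def find (long : String) (short : String) : String :=
  let L := long.toList
  let S := short.toList
  let res := (PySem.List.pyRange 0 (PySem.List.len L - PySem.List.len S + 1) 1).foldl
    (fun (st : List Char × Int) k =>
      let ch1 := PySem.List.slice L (some k) (some (k + PySem.List.len S))
      let ch := PySem.List.slice S (some 0) (some (PySem.List.len S))
      let r := (PySem.List.pyRange 0 (PySem.List.len S) 1).foldl
        (fun (p : Int × Int × List Char) j =>
          -- ch1[j] / ch[j]: j is always in range here (0 ≤ j < len(short) = len(ch1) = len(ch)),
          -- so the total pyGetD is exact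
          let s1 := PySem.List.pyGetD ch1 j ' '
          let s2 := PySem.List.pyGetD ch j ' '
          let times := if s1 == s2 then p.1 + 1 else p.1
          if p.2.1 < times then
            (times, times, PySem.List.slice L (some k) (some (k + PySem.List.len S)))
          else (times, p.2.1, p.2.2))
        (0, st.2, st.1)
      (r.2.2, r.2.1))
    (([] : List Char), (0 : Int))
  String.ofList res.1

-- ===== PORT B =====
-- termination measures for the binary-search loop (cited by name in decreasing_by)
theorem blGo_dec1 (lo hi : Int) (h : lo < hi) :
    (hi - (PySem.Int.floordiv (lo + hi) 2 + 1)).toNat < (hi - lo).toNat := by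
  have hb := PySem.Int.floordiv_two_mid_bounds (le_of_lt h)
  omega


theorem blGo_dec2 (lo hi : Int) (h : lo < hi) :
    (PySem.Int.floordiv (lo + hi) 2 - lo).toNat < (hi - lo).toNat := by
  have hb := PySem.Int.floordiv_two_mid_bounds (le_of_lt h)
  have hlt : PySem.Int.floordiv (lo + hi) 2 < hi := by
    rw [PySem.Int.floordiv_lt_iff_lt_mul (by omega)]
    omega
  omega


-- while lo < hi: mid = (lo+hi)//2; ...  (the body of Python helper bl)
def blGo (lst : List Int) (x : Int) (lo hi : Int) : Int :=
  if h : lo < hi then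
    let mid := PySem.Int.floordiv (lo + hi) 2
    if PySem.List.pyGetD lst mid 0 < x then blGo lst x (mid + 1) hi
    else blGo lst x lo mid
  else lo
termination_by (hi - lo).toNat
decreasing_by
  · exact blGo_dec1 lo hi h
  · exact blGo_dec2 lo hi h


def bl (lst : List Int) (x : Int) : Int := blGo lst x 0 (PySem.List.len lst)


def find_alt (long : String) (short : String) : String :=
  let L := long.toList
  let S := short.toList
  let n : Int := PySem.List.len L
  let m : Int := PySem.List.len S
  let w : Int := n - m
  -- pos = {}; for j, c in enumerate(short): pos.setdefault(c, []).append(j)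
  let pos := (PySem.List.enumerate S 0).foldl
    (fun (d : PySem.Dict Char (List Int)) jc => d.modify jc.2 [] (fun l => l ++ [jc.1]))
    PySem.Dict.empty
  -- counts = [0] * (w + 1)
  let counts0 : List Int := PySem.List.pyRepeat [0] (w + 1)
  -- for i, c in enumerate(long): for j in lst[bl(lst, i - w):bl(lst, i + 1)]: counts[i - j] += 1
  -- (the sliced bucket only holds j with 0 <= i - j <= w, so counts[i - j] is always in
  --  range and the total pySetD/pyGetD are exact here)
  let counts := (PySem.List.enumerate L 0).foldl
    (fun cs ic =>
      let lst := pos.getD ic.2 []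
      (PySem.List.slice lst (some (bl lst (ic.1 - w))) (some (bl lst (ic.1 + 1)))).foldl
        (fun cs j => PySem.List.pySetD cs (ic.1 - j) (PySem.List.pyGetD cs (ic.1 - j) 0 + 1))
        cs)
    counts0
  -- best, hi = -1, 0; for k, c in enumerate(counts): if c > hi: best, hi = k, c
  let fin := (PySem.List.enumerate counts 0).foldl
    (fun (p : Int × Int) kc => if p.2 < kc.2 then (kc.1, kc.2) else p) (-1, 0)
  if 0 ≤ fin.1 then String.ofList (PySem.List.slice L (some fin.1) (some (fin.1 + m))) else ""

-- ===== PRECONDITION & SPEC =====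
def Spec_find (long : String) (short : String) (out : String) : Prop := out = find_alt long short
instance (long : String) (short : String) (out : String) : Decidable (Spec_find long short out) := by unfold Spec_find; infer_instance

-- ===== CLAIM (what is proved, stated in full; the proofs are below) =====
def Claim_equal_find : Prop := ∀ (long : String) (short : String), Dom_find long short → Spec_find long short (find long short)

-- ===== LEMMAS AND PROOFS =====

def winF (L : List Char) (m kn : Nat) : List Char := (L.drop kn).take m
def cntF (L S : List Char) (kn : Nat) : Nat :=
  (List.range S.length).countP (fun j => L.getD (kn + j) ' ' == S.getD j ' ')

theorem pyRange_zero_eq (b : Int) :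
    PySem.List.pyRange 0 b 1 = (List.range b.toNat).map (fun k : Nat => (k:Int)) := by
  simp [PySem.List.pyRange_one]

theorem win_getD (L : List Char) (m kn j : Nat) (hj : j < m) :
    ((L.drop kn).take m).getD j ' ' = L.getD (kn + j) ' ' := by
  simp [List.getD, hj, List.getElem?_drop]

theorem slice_zero_len (S : List Char) :
    PySem.List.slice S (some (0:Int)) (some (PySem.List.len S)) = S := by
  simp [PySem.List.slice_to_natCast]

theorem slice_win (L : List Char) (kn : Nat) (m : Nat) :
    PySem.List.slice L (some (kn:Int)) (some ((kn:Int) + (m:Nat))) = winF L m kn := by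
  rw [PySem.List.slice_natCast_add]; rfl

theorem cnt_eq (L S : List Char) (kn : Nat) :
    (PySem.List.pyRange 0 (PySem.List.len S) 1).countP
      (fun j => PySem.List.pyGetD (PySem.List.slice L (some (kn:Int)) (some ((kn:Int) + PySem.List.len S))) j ' '
             == PySem.List.pyGetD (PySem.List.slice S (some (0:Int)) (some (PySem.List.len S))) j ' ')
      = cntF L S kn := by
  rw [pyRange_zero_eq]
  simp only [PySem.List.len_eq, Int.toNat_natCast]
  rw [List.countP_map (f := fun (k : Nat) => (k : Int))]
  unfold cntF
  apply List.countP_congr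
  intro j hj
  simp only [List.mem_range] at hj
  have hw := slice_win L kn S.length
  simp only [PySem.List.len_eq] at hw
  rw [Function.comp_apply, hw]
  have hs := slice_zero_len S
  simp only [PySem.List.len_eq] at hs
  rw [hs, PySem.List.pyGetD_natCast, PySem.List.pyGetD_natCast]
  rw [show winF L S.length kn = (L.drop kn).take S.length from rfl, win_getD L S.length kn j hj]

theorem innerA_eq (p : Int → Bool) (win : List Char) :
    ∀ (js : List Int) (t h : Int) (l : List Char), t ≤ h →
    js.foldl (fun (st : Int × Int × List Char) j =>
        if st.2.1 < (if p j then st.1 + 1 else st.1) then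
          ((if p j then st.1 + 1 else st.1), (if p j then st.1 + 1 else st.1), win)
        else ((if p j then st.1 + 1 else st.1), st.2.1, st.2.2)) (t, h, l)
      = (t + js.countP p, max h (t + (js.countP p : Int)),
         if h < t + (js.countP p : Int) then win else l) := by
  intro js
  induction js with
  | nil =>
    intro t h l ht
    simp only [List.foldl_nil, List.countP_nil]
    refine Prod.ext (by simp) (Prod.ext (by simp; omega) ?_)
    simp only []
    rw [if_neg (by omega)]
  | cons j js ih =>
    intro t h l ht
    simp only [List.foldl_cons, List.countP_cons]
    cases hpj : p j with
    | true =>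
      simp only [hpj, if_true]
      by_cases hlt : h < t + 1
      · rw [if_pos hlt, ih (t+1) (t+1) win (le_refl _)]
        refine Prod.ext (by push_cast; ring) (Prod.ext ?_ ?_)
        · simp only []; push_cast; omega
        · simp only [ite_self]
          rw [if_pos (by push_cast; omega)]
      · rw [if_neg hlt, ih (t+1) h l (by omega)]
        refine Prod.ext (by push_cast; ring) (Prod.ext ?_ ?_)
        · simp only []; push_cast; omega
        · simp only []
          by_cases hc : h < t + 1 + (js.countP p : Int)
          · rw [if_pos hc, if_pos (by push_cast; omega)]
          · rw [if_neg hc, if_neg (by push_cast; omega)]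
    | false =>
      simp only [hpj, Bool.false_eq_true, if_false]
      rw [if_neg (by omega), ih t h l ht]
      simp

def stepA (L S : List Char) (st : List Char × Int) (k : Int) : List Char × Int :=
  let ch1 := PySem.List.slice L (some k) (some (k + PySem.List.len S))
  let ch := PySem.List.slice S (some 0) (some (PySem.List.len S))
  let r := (PySem.List.pyRange 0 (PySem.List.len S) 1).foldl
    (fun (p : Int × Int × List Char) j =>
      let s1 := PySem.List.pyGetD ch1 j ' '
      let s2 := PySem.List.pyGetD ch j ' '
      let times := if s1 == s2 then p.1 + 1 else p.1
      if p.2.1 < times then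
        (times, times, PySem.List.slice L (some k) (some (k + PySem.List.len S)))
      else (times, p.2.1, p.2.2))
    (0, st.2, st.1)
  (r.2.2, r.2.1)

theorem stepA_char (L S : List Char) (st : List Char × Int) (kn : Nat) (hst : 0 ≤ st.2) :
    stepA L S st (kn : Int)
      = (if st.2 < (cntF L S kn : Int) then winF L S.length kn else st.1,
         max st.2 ((cntF L S kn : Int))) := by
  unfold stepA
  simp only []
  rw [innerA_eq (fun j => PySem.List.pyGetD (PySem.List.slice L (some (kn:Int)) (some ((kn:Int) + PySem.List.len S))) j ' '
             == PySem.List.pyGetD (PySem.List.slice S (some (0:Int)) (some (PySem.List.len S))) j ' ')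
      (PySem.List.slice L (some (kn:Int)) (some ((kn:Int) + PySem.List.len S)))
      (PySem.List.pyRange 0 (PySem.List.len S) 1) 0 st.2 st.1 hst]
  rw [cnt_eq L S kn]
  have hw := slice_win L kn S.length
  simp only [PySem.List.len_eq] at hw
  simp only [PySem.List.len_eq, zero_add, hw]

def selA (L S : List Char) (wn : Nat) : List Char × Int :=
  (List.range wn).foldl
    (fun st kn => (if st.2 < (cntF L S kn : Int) then winF L S.length kn else st.1,
                   max st.2 ((cntF L S kn : Int))))
    ([], 0)

theorem outerA_fold (L S : List Char) :
    ∀ (ks : List Nat) (l : List Char) (h : Int), 0 ≤ h →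
    (ks.map (fun k : Nat => (k:Int))).foldl (stepA L S) (l, h)
      = ks.foldl
          (fun st kn => (if st.2 < (cntF L S kn : Int) then winF L S.length kn else st.1,
                         max st.2 ((cntF L S kn : Int)))) (l, h) := by
  intro ks
  induction ks with
  | nil => intro l h h0; rfl
  | cons k ks ih =>
    intro l h h0
    simp only [List.map_cons, List.foldl_cons]
    rw [stepA_char L S (l, h) k h0]
    exact ih _ _ (le_trans h0 (le_max_left _ _))


theorem find_eq (long short : String) :
    find long short
      = String.ofList (selA long.toList short.toList
          ((PySem.List.len long.toList - PySem.List.len short.toList + 1).toNat)).1 := by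
  have h1 : find long short
      = String.ofList (((PySem.List.pyRange 0 (PySem.List.len long.toList - PySem.List.len short.toList + 1) 1).foldl
          (stepA long.toList short.toList) ([], 0)).1) := rfl
  rw [h1, pyRange_zero_eq, outerA_fold long.toList short.toList _ _ _ (le_refl 0)]
  rfl

def posIdx (S : List Char) (c : Char) : List Nat :=
  (List.range S.length).filter (fun j => S.getD j ' ' == c)

theorem pos_getD (S : List Char) (c : Char) :
    ((PySem.List.enumerate S 0).foldl
      (fun (d : PySem.Dict Char (List Int)) jc => d.modify jc.2 [] (fun l => l ++ [jc.1]))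
      PySem.Dict.empty).getD c []
    = (posIdx S c).map (fun j : Nat => (j:Int)) := by
  rw [PySem.List.enumerate_eq_map_pyRange (d := ' '), List.foldl_map, pyRange_zero_eq,
      List.foldl_map]
  simp only [PySem.List.len_eq, Int.toNat_natCast, PySem.List.pyGetD_natCast]
  rw [← List.foldl_map (f := fun jn : Nat => (S.getD jn ' ', (jn:Int)))
        (g := fun (d : PySem.Dict Char (List Int)) p => d.modify p.1 [] (fun l => l ++ [p.2]))]
  rw [PySem.Dict.getD_foldl_modify_append]
  simp only [List.filter_map, List.map_map, posIdx]
  simp [Function.comp_def, List.getD]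

theorem getD_set_int (l : List Int) (j : Nat) (v : Int) (k : Nat) :
    (l.set j v).getD k 0 = if k = j ∧ j < l.length then v else l.getD k 0 := by
  simp [List.getD, List.getElem?_set]; split_ifs <;> simp_all

theorem bump_length (P : Nat × Nat → Prop) [DecidablePred P] (f : Nat × Nat → Nat) :
    ∀ (es : List (Nat × Nat)) (cs : List Int),
    (es.foldl (fun cs e => if P e then cs.set (f e) (cs.getD (f e) 0 + 1) else cs) cs).length
      = cs.length := by
  intro es
  induction es with
  | nil => intro cs; rfl
  | cons e es ih =>
    intro cs
    simp only [List.foldl_cons]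
    rw [ih]
    split_ifs <;> simp

theorem bump_getD (P : Nat × Nat → Prop) [DecidablePred P] (f : Nat × Nat → Nat) :
    ∀ (es : List (Nat × Nat)) (cs : List Int) (kn : Nat),
    (∀ e ∈ es, P e → f e < cs.length) →
    (es.foldl (fun cs e => if P e then cs.set (f e) (cs.getD (f e) 0 + 1) else cs) cs).getD kn 0
      = cs.getD kn 0 + (es.countP (fun e => decide (P e) && decide (f e = kn)) : Int) := by
  intro es
  induction es with
  | nil => intro cs kn _; simp
  | cons e es ih =>
    intro cs kn hP
    simp only [List.foldl_cons, List.countP_cons]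
    by_cases hpe : P e
    · rw [if_pos hpe, ih _ kn (by intro e' he' hp'; simpa using hP e' (List.mem_cons_of_mem _ he') hp')]
      rw [getD_set_int]
      have hfe : f e < cs.length := hP e List.mem_cons_self hpe
      by_cases hk : kn = f e
      · rw [if_pos ⟨hk, hfe⟩]
        simp only [hpe, hk, decide_true, Bool.and_self]
        push_cast; ring
      · rw [if_neg (by tauto)]
        have : decide (f e = kn) = false := by simp [Ne.symm hk]
        simp [this]
    · rw [if_neg hpe]
      rw [ih _ kn (by intro e' he' hp'; exact hP e' (List.mem_cons_of_mem _ he') hp')]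
      have : decide (P e) = false := by simp [hpe]
      simp [this]

theorem countP_flatMap_sum {α β : Type} (l : List α) (f : α → List β) (p : β → Bool) :
    (l.flatMap f).countP p = (l.map (fun x => (f x).countP p)).sum := by
  induction l with
  | nil => simp
  | cons x xs ih => simp [List.flatMap_cons, List.countP_append, ih]

theorem countP_range_single (m j0 : Nat) (q : Nat → Bool) :
    (List.range m).countP (fun j => decide (j = j0) && q j)
      = if j0 < m ∧ q j0 then 1 else 0 := by
  induction m with
  | zero => simp
  | succ m ih =>
    rw [List.range_succ, List.countP_append, ih]
    by_cases hj : j0 < m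
    · have : (List.countP (fun j => decide (j = j0) && q j) [m]) = 0 := by
        simp [List.countP_cons]; omega
      rw [this]
      split_ifs with h1 h2 <;> simp_all <;> omega
    · by_cases hm : j0 = m
      · subst hm
        simp only [if_neg (by omega), Nat.zero_add, List.countP_cons, List.countP_nil]
        cases hq : q j0 <;> simp [hq] <;> omega
      · have : (List.countP (fun j => decide (j = j0) && q j) [m]) = 0 := by
          simp [List.countP_cons]; omega
        rw [this]
        split_ifs with h1 <;> simp_all <;> omega

theorem sum_ite_prop {α : Type} (l : List α) (P : α → Prop) [DecidablePred P] :
    (l.map (fun x => if P x then 1 else 0)).sum = l.countP (fun x => decide (P x)) := by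
  induction l with
  | nil => rfl
  | cons x xs ih =>
    simp only [List.map_cons, List.sum_cons, List.countP_cons, ih, decide_eq_true_eq]
    by_cases h : P x
    · simp [h]; omega
    · simp [h]

theorem events_count (L S : List Char) (kn : Nat)
    (hkn : (kn : Int) ≤ (L.length : Int) - (S.length : Int)) :
    ((List.range L.length).flatMap
        (fun i => (posIdx S (L.getD i ' ')).map (fun j => (i, j)))).countP
      (fun e => decide (e.2 ≤ e.1 ∧ (e.1:Int) - (e.2:Int) ≤ (L.length:Int) - (S.length:Int))
                 && decide (e.1 - e.2 = kn))
      = cntF L S kn := by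
  rw [countP_flatMap_sum]
  have hmap : ∀ i : Nat,
      ((posIdx S (L.getD i ' ')).map (fun j => (i, j))).countP
        (fun e => decide (e.2 ≤ e.1 ∧ (e.1:Int) - (e.2:Int) ≤ (L.length:Int) - (S.length:Int))
                   && decide (e.1 - e.2 = kn))
      = if kn ≤ i ∧ i - kn < S.length ∧ (S.getD (i-kn) ' ' == L.getD i ' ') = true then 1 else 0 := by
    intro i
    rw [List.countP_map, posIdx, List.countP_filter]
    have hcong : ∀ j ∈ List.range S.length,
        (((fun e : Nat × Nat => decide (e.2 ≤ e.1 ∧ (e.1:Int) - (e.2:Int) ≤ (L.length:Int) - (S.length:Int))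
                 && decide (e.1 - e.2 = kn)) ∘ (fun j => (i, j))) j
          && (S.getD j ' ' == L.getD i ' '))
        = (decide (j = i - kn) && (decide (kn ≤ i) && (S.getD j ' ' == L.getD i ' '))) := by
      intro j _
      simp only [Function.comp_apply]
      rw [← Bool.and_assoc (decide (j = i - kn)), ← Bool.decide_and, ← Bool.decide_and]
      have hPQ : ((j ≤ i ∧ (i:Int) - (j:Int) ≤ (L.length:Int) - (S.length:Int)) ∧ i - j = kn)
          ↔ (j = i - kn ∧ kn ≤ i) := by omega
      rw [decide_eq_decide.mpr hPQ]
    rw [List.countP_congr (fun x hx => by rw [hcong x hx])]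
    rw [countP_range_single S.length (i - kn)
        (fun j => decide (kn ≤ i) && (S.getD j ' ' == L.getD i ' '))]
    have hiff : (i - kn < S.length ∧ (decide (kn ≤ i) && (S.getD (i-kn) ' ' == L.getD i ' ')) = true)
        ↔ (kn ≤ i ∧ i - kn < S.length ∧ (S.getD (i-kn) ' ' == L.getD i ' ') = true) := by
      rw [Bool.and_eq_true, decide_eq_true_eq]
      tauto
    exact if_congr hiff rfl rfl
  rw [List.map_congr_left (fun i _ => hmap i)]
  rw [sum_ite_prop]
  obtain ⟨r, hr⟩ : ∃ r, L.length = kn + (S.length + r) := ⟨L.length - S.length - kn, by omega⟩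
  rw [hr, List.range_add, List.countP_append, List.range_add, List.map_append, List.countP_append,
      List.countP_map, List.countP_map]
  have c1 : (List.range kn).countP
      (fun i => decide (kn ≤ i ∧ i - kn < S.length ∧ (S.getD (i-kn) ' ' == L.getD i ' ') = true)) = 0 := by
    rw [List.countP_eq_zero]
    intro i hi
    simp only [List.mem_range] at hi
    simp only [decide_eq_true_eq]
    rintro ⟨h1, -, -⟩
    omega
  have c3 : ((List.range r).map (fun x => S.length + x)).countP
      ((fun i => decide (kn ≤ i ∧ i - kn < S.length ∧ (S.getD (i-kn) ' ' == L.getD i ' ') = true))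
        ∘ (fun k => kn + k)) = 0 := by
    rw [List.countP_eq_zero]
    intro i hi
    simp only [List.mem_map, List.mem_range] at hi
    obtain ⟨x, hx, rfl⟩ := hi
    simp only [Function.comp_apply, decide_eq_true_eq]
    rintro ⟨h1, h2, -⟩
    omega
  have c2 : (List.range S.length).countP
      ((fun i => decide (kn ≤ i ∧ i - kn < S.length ∧ (S.getD (i-kn) ' ' == L.getD i ' ') = true))
        ∘ (fun k => kn + k))
      = cntF L S kn := by
    unfold cntF
    apply List.countP_congr
    intro j hj
    simp only [List.mem_range] at hj
    simp only [Function.comp_apply, decide_eq_true_eq]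
    have h1 : kn + j - kn = j := by omega
    rw [h1]
    constructor
    · rintro ⟨-, -, h⟩
      exact beq_iff_eq.mpr (beq_iff_eq.mp h).symm
    · intro h
      exact ⟨by omega, hj, beq_iff_eq.mpr (beq_iff_eq.mp h).symm⟩
  rw [c1, c2, c3]
  omega

theorem scan_rel (cv : Nat → Int) (win : Nat → List Char) :
    ∀ (ks : List Nat) (l : List Char) (b h : Int),
    l = (if 0 ≤ b then win b.toNat else []) →
    ks.foldl (fun st kn => (if st.2 < cv kn then win kn else st.1, max st.2 (cv kn))) (l, h)
      = ((if 0 ≤ (ks.foldl (fun p kn => if p.2 < cv kn then ((kn:Int), cv kn) else p) (b, h)).1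
          then win (ks.foldl (fun p kn => if p.2 < cv kn then ((kn:Int), cv kn) else p) (b, h)).1.toNat
          else []),
         (ks.foldl (fun p kn => if p.2 < cv kn then ((kn:Int), cv kn) else p) (b, h)).2) := by
  intro ks
  induction ks with
  | nil =>
    intro l b h hl
    simpa using hl
  | cons k ks ih =>
    intro l b h hl
    simp only [List.foldl_cons]
    by_cases hc : h < cv k
    · rw [if_pos hc, if_pos hc]
      rw [max_eq_right (le_of_lt hc)]
      exact ih (win k) (k:Int) (cv k) (by simp)
    · rw [if_neg hc, if_neg hc]
      rw [max_eq_left (by omega)]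
      exact ih l b h hl

abbrev guardP (L S : List Char) (e : Nat × Nat) : Prop :=
  e.2 ≤ e.1 ∧ (e.1:Int) - (e.2:Int) ≤ (L.length:Int) - (S.length:Int)

def bstep (L S : List Char) (cs : List Int) (e : Nat × Nat) : List Int :=
  if guardP L S e then cs.set (e.1 - e.2) (cs.getD (e.1 - e.2) 0 + 1) else cs

def eventsF (L S : List Char) : List (Nat × Nat) :=
  (List.range L.length).flatMap (fun i => (posIdx S (L.getD i ' ')).map (fun j => (i, j)))

theorem nested_eq (L S : List Char) (ls : List Nat) (cs : List Int) :
    ls.foldl (fun cs i => (posIdx S (L.getD i ' ')).foldl (fun cs jn => bstep L S cs (i, jn)) cs) cs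
      = (ls.flatMap (fun i => (posIdx S (L.getD i ' ')).map (fun j => (i, j)))).foldl (bstep L S) cs := by
  rw [List.foldl_flatMap]
  apply PySem.List.foldl_congr_mem
  intro acc x _
  rw [List.foldl_map]

theorem replicate_getD (n k : Nat) : (List.replicate n (0:Int)).getD k 0 = 0 := by
  simp [List.getD, List.getElem?_replicate]; split_ifs <;> rfl

theorem counts_len (L S : List Char) (cs : List Int) :
    ((eventsF L S).foldl (bstep L S) cs).length = cs.length := by
  have h := bump_length (guardP L S) (fun e => e.1 - e.2) (eventsF L S) cs
  simpa [bstep] using h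

theorem counts_getD (L S : List Char) (kn : Nat)
    (hkn : (kn : Int) ≤ (L.length : Int) - (S.length : Int)) :
    ((eventsF L S).foldl (bstep L S)
        (List.replicate ((L.length : Int) - (S.length : Int) + 1).toNat 0)).getD kn 0
      = cntF L S kn := by
  have hP : ∀ e ∈ eventsF L S, guardP L S e →
      e.1 - e.2 < (List.replicate ((L.length : Int) - (S.length : Int) + 1).toNat (0:Int)).length := by
    intro e _ hg
    obtain ⟨h1, h2⟩ := hg
    simp only [List.length_replicate]
    omega
  have h := bump_getD (guardP L S) (fun e => e.1 - e.2) (eventsF L S) _ kn hP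
  rw [show (fun cs e => if guardP L S e then cs.set (e.1 - e.2) (cs.getD (e.1 - e.2) 0 + 1) else cs)
      = bstep L S from rfl] at h
  rw [h, replicate_getD]
  have he := events_count L S kn hkn
  rw [show (fun (e : Nat × Nat) => decide (e.2 ≤ e.1 ∧ (e.1:Int) - (e.2:Int) ≤ (L.length:Int) - (S.length:Int))
                 && decide (e.1 - e.2 = kn))
      = (fun (e : Nat × Nat) => decide (guardP L S e) && decide (e.1 - e.2 = kn)) from rfl] at he
  rw [show eventsF L S = (List.range L.length).flatMap
      (fun i => (posIdx S (L.getD i ' ')).map (fun j => (i, j))) from rfl] at *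
  rw [he]
  omega

theorem sorted_getD_mono (lst : List Int) (hs : lst.Pairwise (· ≤ ·)) (p q : Nat)
    (hpq : p ≤ q) (hq : q < lst.length) : lst.getD p 0 ≤ lst.getD q 0 := by
  rcases Nat.eq_or_lt_of_le hpq with rfl | hlt
  · exact le_refl _
  · rw [List.getD, List.getD, List.getElem?_eq_getElem (by omega), List.getElem?_eq_getElem hq]
    exact (List.pairwise_iff_getElem.mp hs) p q (by omega) hq hlt


theorem blGo_spec (lst : List Int) (x : Int) (hs : lst.Pairwise (· ≤ ·)) :
    ∀ (fuel : Nat) (lo hi : Int), (hi - lo).toNat ≤ fuel →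
    0 ≤ lo → lo ≤ hi → hi ≤ lst.length →
    (∀ idx : Nat, idx < lo.toNat → lst.getD idx 0 < x) →
    (∀ idx : Nat, hi.toNat ≤ idx → idx < lst.length → x ≤ lst.getD idx 0) →
    lo ≤ blGo lst x lo hi ∧ blGo lst x lo hi ≤ hi ∧
    (∀ idx : Nat, idx < (blGo lst x lo hi).toNat → lst.getD idx 0 < x) ∧
    (∀ idx : Nat, (blGo lst x lo hi).toNat ≤ idx → idx < lst.length → x ≤ lst.getD idx 0) := by
  intro fuel
  induction fuel with
  | zero =>
    intro lo hi hf h0 hlh hhl hlow hhigh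
    have : ¬ lo < hi := by omega
    rw [blGo, dif_neg this]
    refine ⟨le_refl _, hlh, hlow, ?_⟩
    intro idx hidx hlen
    exact hhigh idx (by omega) hlen
  | succ fuel ih =>
    intro lo hi hf h0 hlh hhl hlow hhigh
    by_cases hc : lo < hi
    · rw [blGo, dif_pos hc]
      simp only []
      have hb := PySem.Int.floordiv_two_mid_bounds (le_of_lt hc)
      have hmidlt : PySem.Int.floordiv (lo + hi) 2 < hi := by
        rw [PySem.Int.floordiv_lt_iff_lt_mul (by omega)]; omega
      set mid := PySem.Int.floordiv (lo + hi) 2 with hmid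
      have hmlen : mid.toNat < lst.length := by omega
      have hmg : PySem.List.pyGetD lst mid 0 = lst.getD mid.toNat 0 := by
        rw [PySem.List.pyGetD_eq_getElem lst 0 (by omega) (by push_cast; omega), List.getD,
            List.getElem?_eq_getElem hmlen]
        rfl
      rw [hmg]
      by_cases hlt : lst.getD mid.toNat 0 < x
      · rw [if_pos hlt]
        have hlow' : ∀ idx : Nat, idx < (mid+1).toNat → lst.getD idx 0 < x := by
          intro idx hidx
          exact lt_of_le_of_lt (sorted_getD_mono lst hs idx mid.toNat (by omega) hmlen) hlt
        obtain ⟨r1, r2, r3, r4⟩ := ih (mid+1) hi (by omega) (by omega) (by omega) hhl hlow' hhigh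
        exact ⟨by omega, r2, r3, r4⟩
      · rw [if_neg hlt]
        have hhigh' : ∀ idx : Nat, mid.toNat ≤ idx → idx < lst.length → x ≤ lst.getD idx 0 := by
          intro idx hidx hlen
          exact le_trans (by omega) (sorted_getD_mono lst hs mid.toNat idx hidx hlen)
        obtain ⟨r1, r2, r3, r4⟩ := ih lo mid (by omega) h0 (by omega) (by omega) hlow hhigh'
        exact ⟨r1, by omega, r3, r4⟩
    · rw [blGo, dif_neg hc]
      have : lo = hi := by omega
      refine ⟨le_refl _, hlh, hlow, ?_⟩
      intro idx hidx hlen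
      exact hhigh idx (by omega) hlen


theorem slice_eq_filter (lst : List Int) (x1 x2 : Int) (A B : Nat)
    (hA : A ≤ lst.length) (hB : B ≤ lst.length)
    (hA1 : ∀ idx : Nat, idx < A → lst.getD idx 0 < x1)
    (hA2 : ∀ idx : Nat, A ≤ idx → idx < lst.length → x1 ≤ lst.getD idx 0)
    (hB1 : ∀ idx : Nat, idx < B → lst.getD idx 0 < x2)
    (hB2 : ∀ idx : Nat, B ≤ idx → idx < lst.length → x2 ≤ lst.getD idx 0) :
    (lst.drop A).take (B - A) = lst.filter (fun v => decide (x1 ≤ v) && decide (v < x2)) := by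
  have hgd : ∀ (idx : Nat) (h : idx < lst.length), lst.getD idx 0 = lst[idx]'h := by
    intro idx h
    rw [List.getD, List.getElem?_eq_getElem h]
    rfl
  by_cases hAB : A ≤ B
  · have hdec : lst = lst.take A ++ ((lst.drop A).take (B - A) ++ lst.drop B) := by
      rw [show lst.drop B = (lst.drop A).drop (B - A) from by rw [List.drop_drop]; congr 1; omega]
      rw [List.take_append_drop, List.take_append_drop]
    conv_rhs => rw [hdec]
    rw [List.filter_append, List.filter_append]
    have h1 : (lst.take A).filter (fun v => decide (x1 ≤ v) && decide (v < x2)) = [] := by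
      rw [List.filter_eq_nil_iff]
      intro a ha
      obtain ⟨k, hk, rfl⟩ := List.mem_iff_getElem.mp ha
      have hkA : k < A := by
        have := hk; simp [List.length_take] at this; omega
      rw [List.getElem_take]
      have := hA1 k hkA
      rw [hgd k (by omega)] at this
      simp only [Bool.and_eq_true, decide_eq_true_eq, not_and]
      intro hx1
      omega
    have h3 : (lst.drop B).filter (fun v => decide (x1 ≤ v) && decide (v < x2)) = [] := by
      rw [List.filter_eq_nil_iff]
      intro a ha
      obtain ⟨k, hk, rfl⟩ := List.mem_iff_getElem.mp ha
      rw [List.getElem_drop]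
      have hlen : B + k < lst.length := by simp [List.length_drop] at hk; omega
      have := hB2 (B + k) (by omega) hlen
      rw [hgd _ hlen] at this
      simp only [Bool.and_eq_true, decide_eq_true_eq, not_and]
      intro hx1
      omega
    have h2 : ((lst.drop A).take (B - A)).filter (fun v => decide (x1 ≤ v) && decide (v < x2))
        = (lst.drop A).take (B - A) := by
      rw [List.filter_eq_self]
      intro a ha
      obtain ⟨k, hk, rfl⟩ := List.mem_iff_getElem.mp ha
      have hkB : k < B - A := by simp [List.length_take] at hk; omega
      rw [List.getElem_take, List.getElem_drop]
      have hlen : A + k < lst.length := by omega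
      have hle := hA2 (A + k) (by omega) hlen
      have hlt := hB1 (A + k) (by omega)
      rw [hgd _ hlen] at hle hlt
      simp only [Bool.and_eq_true, decide_eq_true_eq]
      exact ⟨hle, hlt⟩
    rw [h1, h2, h3, List.nil_append, List.append_nil]
  · have hBA : B - A = 0 := by omega
    rw [hBA, List.take_zero]
    symm
    rw [List.filter_eq_nil_iff]
    intro a ha
    obtain ⟨k, hk, rfl⟩ := List.mem_iff_getElem.mp ha
    simp only [Bool.and_eq_true, decide_eq_true_eq, not_and]
    intro hx1 hx2
    by_cases hkB : k < B
    · have := hB1 k hkB; rw [hgd k hk] at this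
      have h2 := hA1 k (by omega); rw [hgd k hk] at h2
      omega
    · have := hB2 k (by omega) hk; rw [hgd k hk] at this
      omega


theorem posIdx_cast_sorted (S : List Char) (c : Char) :
    ((posIdx S c).map (fun j : Nat => (j:Int))).Pairwise (· ≤ ·) := by
  rw [List.pairwise_map]
  have h1 : (posIdx S c).Pairwise (· < ·) :=
    (List.pairwise_lt_range).sublist List.filter_sublist
  exact h1.imp (by intro a b h; exact_mod_cast le_of_lt h)


theorem setstep_eq_bstep (L S : List Char) (cs : List Int) (i jn : Nat)
    (hg : guardP L S (i, jn)) :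
    PySem.List.pySetD cs ((i:Int) - (jn:Int)) (PySem.List.pyGetD cs ((i:Int) - (jn:Int)) 0 + 1)
      = bstep L S cs (i, jn) := by
  unfold bstep
  rw [if_pos hg]
  obtain ⟨h1, h2⟩ := hg
  have hik : (i:Int) - (jn:Int) = ((i - jn : Nat) : Int) := by omega
  rw [hik, PySem.List.pySetD_natCast, PySem.List.pyGetD_natCast]


theorem inner_eq (L S : List Char) (i : Nat) (cs : List Int) :
    (PySem.List.slice ((posIdx S (L.getD i ' ')).map (fun j : Nat => (j:Int)))
        (some (bl ((posIdx S (L.getD i ' ')).map (fun j : Nat => (j:Int)))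
          ((i:Int) - ((L.length:Int) - (S.length:Int)))))
        (some (bl ((posIdx S (L.getD i ' ')).map (fun j : Nat => (j:Int))) ((i:Int) + 1)))).foldl
      (fun cs j => PySem.List.pySetD cs ((i:Int) - j) (PySem.List.pyGetD cs ((i:Int) - j) 0 + 1)) cs
    = (posIdx S (L.getD i ' ')).foldl (fun cs jn => bstep L S cs (i, jn)) cs := by
  set x1 : Int := (i:Int) - ((L.length:Int) - (S.length:Int)) with hx1
  set x2 : Int := (i:Int) + 1 with hx2
  set lst : List Int := (posIdx S (L.getD i ' ')).map (fun j : Nat => (j:Int)) with hlst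
  have hs : lst.Pairwise (· ≤ ·) := posIdx_cast_sorted S (L.getD i ' ')
  have hspecA := blGo_spec lst x1 hs ((PySem.List.len lst - 0).toNat) 0 (PySem.List.len lst)
      (le_refl _) (le_refl _) (by simp [PySem.List.len_eq]) (by simp [PySem.List.len_eq])
      (by intro idx h; omega) (by intro idx h hl; simp [PySem.List.len_eq] at h; omega)
  have hspecB := blGo_spec lst x2 hs ((PySem.List.len lst - 0).toNat) 0 (PySem.List.len lst)
      (le_refl _) (le_refl _) (by simp [PySem.List.len_eq]) (by simp [PySem.List.len_eq])
      (by intro idx h; omega) (by intro idx h hl; simp [PySem.List.len_eq] at h; omega)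
  obtain ⟨hA0, hAlen, hAlow, hAhigh⟩ := hspecA
  obtain ⟨hB0, hBlen, hBlow, hBhigh⟩ := hspecB
  rw [show bl lst x1 = blGo lst x1 0 (PySem.List.len lst) from rfl,
      show bl lst x2 = blGo lst x2 0 (PySem.List.len lst) from rfl]
  simp only [PySem.List.len_eq] at hA0 hAlen hB0 hBlen hAlow hAhigh hBlow hBhigh ⊢
  rw [PySem.List.slice_toNat _ (by exact hA0) (by exact hB0)]
  rw [slice_eq_filter lst x1 x2 _ _ (by omega) (by omega) hAlow hAhigh hBlow hBhigh]
  rw [List.filter_map, List.foldl_map]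
  have hfc : (posIdx S (L.getD i ' ')).filter
        ((fun v => decide (x1 ≤ v) && decide (v < x2)) ∘ (fun j : Nat => (j:Int)))
      = (posIdx S (L.getD i ' ')).filter (fun jn => decide (guardP L S (i, jn))) := by
    apply List.filter_congr
    intro jn _
    simp only [Function.comp_apply, guardP]
    rw [← Bool.decide_and, decide_eq_decide]
    omega
  rw [hfc]
  have hrhs : (posIdx S (L.getD i ' ')).foldl (fun cs jn => bstep L S cs (i, jn)) cs
      = ((posIdx S (L.getD i ' ')).filter (fun jn => decide (guardP L S (i, jn)))).foldl
          (fun cs jn => cs.set (i - jn) (cs.getD (i - jn) 0 + 1)) cs := by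
    rw [← PySem.List.foldl_ite_eq_foldl_filter]
    apply PySem.List.foldl_congr_mem
    intro acc jn _
    unfold bstep
    rfl
  rw [hrhs]
  apply PySem.List.foldl_congr_mem
  intro acc jn hjn
  have hg : guardP L S (i, jn) := by
    rw [List.mem_filter] at hjn
    exact of_decide_eq_true hjn.2
  rw [setstep_eq_bstep L S acc i jn hg]
  unfold bstep
  rw [if_pos hg]

def scanPart (L : List Char) (m : Int) (counts : List Int) : String :=
  let fin := (PySem.List.enumerate counts 0).foldl
    (fun (p : Int × Int) kc => if p.2 < kc.2 then (kc.1, kc.2) else p) (-1, 0)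
  if 0 ≤ fin.1 then String.ofList (PySem.List.slice L (some fin.1) (some (fin.1 + m))) else ""

theorem scanPart_eq (L S : List Char) :
    scanPart L (PySem.List.len S)
      ((eventsF L S).foldl (bstep L S)
        (List.replicate ((PySem.List.len L - PySem.List.len S + 1)).toNat 0))
    = String.ofList (selA L S ((PySem.List.len L - PySem.List.len S + 1)).toNat).1 := by
  unfold scanPart
  simp only [PySem.List.len_eq]
  have hlen : ((eventsF L S).foldl (bstep L S)
      (List.replicate (((L.length:Int) - (S.length:Int) + 1)).toNat 0)).length
      = (((L.length:Int) - (S.length:Int) + 1)).toNat := by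
    rw [counts_len, List.length_replicate]
  rw [PySem.List.enumerate_eq_map_pyRange (d := 0), List.foldl_map, pyRange_zero_eq,
      List.foldl_map]
  simp only [PySem.List.pyGetD_natCast, PySem.List.len_eq, Int.toNat_natCast, hlen]
  have hcongr : (List.range (((L.length:Int) - (S.length:Int) + 1)).toNat).foldl
      (fun (p : Int × Int) kn => if p.2 < ((eventsF L S).foldl (bstep L S)
          (List.replicate (((L.length:Int) - (S.length:Int) + 1)).toNat 0)).getD kn 0
        then ((kn:Int), ((eventsF L S).foldl (bstep L S)
          (List.replicate (((L.length:Int) - (S.length:Int) + 1)).toNat 0)).getD kn 0) else p)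
      (-1, 0)
      = (List.range (((L.length:Int) - (S.length:Int) + 1)).toNat).foldl
      (fun (p : Int × Int) kn => if p.2 < (cntF L S kn : Int)
        then ((kn:Int), (cntF L S kn : Int)) else p) (-1, 0) := by
    apply PySem.List.foldl_congr_mem
    intro acc kn hkn
    simp only [List.mem_range] at hkn
    rw [counts_getD L S kn (by omega)]
  rw [hcongr]
  have hs : (List.range (((L.length:Int) - (S.length:Int) + 1)).toNat).foldl
      (fun st kn => (if st.2 < (cntF L S kn : Int) then winF L S.length kn else st.1,
                     max st.2 ((cntF L S kn : Int)))) ([], 0)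
      = ((if 0 ≤ ((List.range (((L.length:Int) - (S.length:Int) + 1)).toNat).foldl
            (fun (p : Int × Int) kn => if p.2 < (cntF L S kn : Int)
              then ((kn:Int), (cntF L S kn : Int)) else p) (-1, 0)).1
          then winF L S.length (((List.range (((L.length:Int) - (S.length:Int) + 1)).toNat).foldl
            (fun (p : Int × Int) kn => if p.2 < (cntF L S kn : Int)
              then ((kn:Int), (cntF L S kn : Int)) else p) (-1, 0)).1).toNat
          else []),
         ((List.range (((L.length:Int) - (S.length:Int) + 1)).toNat).foldl
            (fun (p : Int × Int) kn => if p.2 < (cntF L S kn : Int)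
              then ((kn:Int), (cntF L S kn : Int)) else p) (-1, 0)).2) :=
    scan_rel (fun kn => (cntF L S kn : Int)) (winF L S.length)
      (List.range (((L.length:Int) - (S.length:Int) + 1)).toNat) [] (-1) 0 (by norm_num)
  unfold selA
  rw [hs]
  simp only []
  by_cases hf : 0 ≤ ((List.range (((L.length:Int) - (S.length:Int) + 1)).toNat).foldl
      (fun (p : Int × Int) kn => if p.2 < (cntF L S kn : Int)
        then ((kn:Int), (cntF L S kn : Int)) else p) (-1, 0)).1
  · rw [if_pos hf, if_pos hf]
    rw [show ((List.range (((L.length:Int) - (S.length:Int) + 1)).toNat).foldl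
      (fun (p : Int × Int) kn => if p.2 < (cntF L S kn : Int)
        then ((kn:Int), (cntF L S kn : Int)) else p) (-1, 0)).1
      = ((((List.range (((L.length:Int) - (S.length:Int) + 1)).toNat).foldl
      (fun (p : Int × Int) kn => if p.2 < (cntF L S kn : Int)
        then ((kn:Int), (cntF L S kn : Int)) else p) (-1, 0)).1.toNat : Nat) : Int)
      from (Int.toNat_of_nonneg hf).symm, slice_win]
    simp only [Int.toNat_natCast]
  · rw [if_neg hf, if_neg hf]

theorem find_alt_eq (long short : String) :
    find_alt long short
      = String.ofList (selA long.toList short.toList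
          ((PySem.List.len long.toList - PySem.List.len short.toList + 1).toNat)).1 := by
  have hC : ((PySem.List.enumerate long.toList 0).foldl
      (fun cs ic =>
        (PySem.List.slice
            (((PySem.List.enumerate short.toList 0).foldl
                (fun (d : PySem.Dict Char (List Int)) jc => d.modify jc.2 [] (fun l => l ++ [jc.1]))
                PySem.Dict.empty).getD ic.2 [])
            (some (bl (((PySem.List.enumerate short.toList 0).foldl
                (fun (d : PySem.Dict Char (List Int)) jc => d.modify jc.2 [] (fun l => l ++ [jc.1]))
                PySem.Dict.empty).getD ic.2 [])
              (ic.1 - (PySem.List.len long.toList - PySem.List.len short.toList))))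
            (some (bl (((PySem.List.enumerate short.toList 0).foldl
                (fun (d : PySem.Dict Char (List Int)) jc => d.modify jc.2 [] (fun l => l ++ [jc.1]))
                PySem.Dict.empty).getD ic.2 [])
              (ic.1 + 1)))).foldl
          (fun cs j => PySem.List.pySetD cs (ic.1 - j) (PySem.List.pyGetD cs (ic.1 - j) 0 + 1))
          cs)
      (PySem.List.pyRepeat [0] (PySem.List.len long.toList - PySem.List.len short.toList + 1)))
      = (eventsF long.toList short.toList).foldl (bstep long.toList short.toList)
          (List.replicate ((PySem.List.len long.toList - PySem.List.len short.toList + 1)).toNat 0) := by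
    rw [PySem.List.pyRepeat_singleton]
    simp only [pos_getD]
    rw [PySem.List.enumerate_eq_map_pyRange (d := ' '), List.foldl_map, pyRange_zero_eq,
        List.foldl_map]
    simp only [PySem.List.pyGetD_natCast, PySem.List.len_eq, Int.toNat_natCast]
    simp only [inner_eq]
    rw [nested_eq]
    rfl
  have h0 : find_alt long short
      = scanPart long.toList (PySem.List.len short.toList)
          ((PySem.List.enumerate long.toList 0).foldl
            (fun cs ic =>
              (PySem.List.slice
                  (((PySem.List.enumerate short.toList 0).foldl
                      (fun (d : PySem.Dict Char (List Int)) jc => d.modify jc.2 [] (fun l => l ++ [jc.1]))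
                      PySem.Dict.empty).getD ic.2 [])
                  (some (bl (((PySem.List.enumerate short.toList 0).foldl
                      (fun (d : PySem.Dict Char (List Int)) jc => d.modify jc.2 [] (fun l => l ++ [jc.1]))
                      PySem.Dict.empty).getD ic.2 [])
                    (ic.1 - (PySem.List.len long.toList - PySem.List.len short.toList))))
                  (some (bl (((PySem.List.enumerate short.toList 0).foldl
                      (fun (d : PySem.Dict Char (List Int)) jc => d.modify jc.2 [] (fun l => l ++ [jc.1]))
                      PySem.Dict.empty).getD ic.2 [])
                    (ic.1 + 1)))).foldl
                (fun cs j => PySem.List.pySetD cs (ic.1 - j) (PySem.List.pyGetD cs (ic.1 - j) 0 + 1))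
                cs)
            (PySem.List.pyRepeat [0] (PySem.List.len long.toList - PySem.List.len short.toList + 1))) := rfl
  rw [h0, hC, scanPart_eq]

-- ===== VERDICT (by name: the statement is the Claim_ definition above) =====
theorem find_spec : Claim_equal_find := by
  intro long short _
  unfold Spec_find
  rw [find_eq, find_alt_eq]
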